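-- pv_equiv track=rewrite | github.com/lmu-mandy/projects-team-1 | NN.py | load_vocab_tags
-- ===== SOURCE A (Python) =====
-- def load_vocab_tags(train_data):
--   word_to_ix = {} # Maps tokens to an index in the vocabulary.
--   tag_to_ix = {} # Maps tag labels to a unique tag index.
--   ix_to_tag = {} # Maps tag indices back to tag strings.
--   for sent, tags in train_data:
--     for word in sent.split():
--       word_to_ix.setdefault(word, len(word_to_ix))
--     tag_to_ix.setdefault(tags, len(tag_to_ix))
--     ix_to_tag[tag_to_ix[tags]] = tags
--   return word_to_ix, tag_to_ix, ix_to_tag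
-- ===== SOURCE B (Python) =====
-- def load_vocab_tags(train_data):
--   # Sort-based alternative: a reverse sweep records each token's earliest
--   # position (later writes overwrite, so the first occurrence wins), then the
--   # distinct tokens are sorted by that position and enumerated.
--   words = [w for sent, _ in train_data for w in sent.split()]
--   tags = [t for _, t in train_data]
--
--   def rank(stream):
--     first = {}
--     for pos, x in reversed(list(enumerate(stream))):
--       first[x] = pos
--     return sorted(first, key=first.get)
--
--   word_to_ix = {w: i for i, w in enumerate(rank(words))}
--   tag_order = rank(tags)
--   tag_to_ix = {t: i for i, t in enumerate(tag_order)}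
--   ix_to_tag = dict(enumerate(tag_order))
--   return word_to_ix, tag_to_ix, ix_to_tag
-- ===== Notes on version B (the rewrite author's own statement) =====
-- stated objective: alternative
-- what changed: Replaces A's single interleaved setdefault(x, len(d)) counter pass with a sort-based algorithm: a reverse sweep over enumerate(stream) records each token's first-occurrence position (later writes overwrite, so the earliest wins), then the distinct tokens are sorted by that position and enumerated; correct because sorting distinct keys by first-occurrence position reproduces first-occurrence order exactly.
import Mathlib
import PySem

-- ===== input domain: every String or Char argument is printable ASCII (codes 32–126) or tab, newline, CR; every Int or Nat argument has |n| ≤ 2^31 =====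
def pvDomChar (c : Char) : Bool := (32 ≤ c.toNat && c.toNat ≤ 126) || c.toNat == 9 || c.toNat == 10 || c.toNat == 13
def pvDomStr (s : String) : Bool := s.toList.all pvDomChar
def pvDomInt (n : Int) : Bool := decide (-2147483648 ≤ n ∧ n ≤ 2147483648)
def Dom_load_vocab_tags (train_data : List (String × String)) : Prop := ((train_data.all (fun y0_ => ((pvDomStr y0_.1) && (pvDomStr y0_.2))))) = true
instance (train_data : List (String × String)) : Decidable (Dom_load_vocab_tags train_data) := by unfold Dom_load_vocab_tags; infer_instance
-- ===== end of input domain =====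

-- B replaces A's single interleaved setdefault-counter pass by a sort-based algorithm:
-- a reverse sweep records each token's earliest position, then the distinct tokens are
-- sorted by that position and enumerated (same result, different strategy, not faster).

-- ===== PORT A =====
-- A-side helper: the body of A's outer for-loop, named so the proofs can refer to it.
def pvStepA (st : PySem.Dict String Int × PySem.Dict String Int × PySem.Dict Int String)
    (p : String × String) : PySem.Dict String Int × PySem.Dict String Int × PySem.Dict Int String :=
  let word_to_ix := (PySem.Str.split₀ p.1).foldl (fun d w => d.setdefault w (d.size : Int)) st.1
  let tag_to_ix := st.2.1.setdefault p.2 (st.2.1.size : Int)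
  -- tag_to_ix[tags] cannot raise: the key was just setdefault'd, so getD is exact here
  let ix_to_tag := st.2.2.insert (tag_to_ix.getD p.2 0) p.2
  (word_to_ix, tag_to_ix, ix_to_tag)

def load_vocab_tags (train_data : List (String × String)) : (List (String × Int)) × (List (String × Int)) × (List (Int × String)) :=
  let st := train_data.foldl pvStepA (PySem.Dict.empty, PySem.Dict.empty, PySem.Dict.empty)
  (st.1.items, st.2.1.items, st.2.2.items)

-- ===== PORT B =====
-- B-side helper rank(stream): the reverse sweep over enumerate(stream) filling `first`
-- (foldl over the reversed list), then sorted(first, key=first.get).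
def pvRank (stream : List String) : List String :=
  let first := ((PySem.List.enumerate stream).reverse).foldl
    (fun d q => d.insert q.2 q.1) (PySem.Dict.empty : PySem.Dict String Int)
  PySem.List.sorted first.keys (fun x => first.getD x 0)

def load_vocab_tags_alt (train_data : List (String × String)) : (List (String × Int)) × (List (String × Int)) × (List (Int × String)) :=
  let words := train_data.flatMap (fun p => PySem.Str.split₀ p.1)
  let tags := train_data.map (fun p => p.2)
  let word_to_ix := (PySem.List.enumerate (pvRank words)).map (fun q => (q.2, q.1))
  let tag_order := pvRank tags
  let tag_to_ix := (PySem.List.enumerate tag_order).map (fun q => (q.2, q.1))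
  let ix_to_tag := PySem.List.enumerate tag_order
  (word_to_ix, tag_to_ix, ix_to_tag)

-- ===== PRECONDITION & SPEC =====
def Spec_load_vocab_tags (train_data : List (String × String)) (out : (List (String × Int)) × (List (String × Int)) × (List (Int × String))) : Prop := out = load_vocab_tags_alt train_data
instance (train_data : List (String × String)) (out : (List (String × Int)) × (List (String × Int)) × (List (Int × String))) : Decidable (Spec_load_vocab_tags train_data out) := by unfold Spec_load_vocab_tags; infer_instance

-- ===== CLAIM (what is proved, stated in full; the proofs are below) =====
def Claim_equal_load_vocab_tags : Prop := ∀ (train_data : List (String × String)), Dom_load_vocab_tags train_data → Spec_load_vocab_tags train_data (load_vocab_tags train_data)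

-- ===== LEMMAS AND PROOFS =====

-- the items list of word_to_ix / tag_to_ix when the first-occurrence order is ws
def pvIdex (ws : List String) : List (String × Int) :=
  (PySem.List.enumerate ws).map (fun q => (q.2, q.1))

theorem pvKeys_idex (ws : List String) : (PySem.Dict.mk (pvIdex ws)).keys = ws := by
  simp [pvIdex, PySem.Dict.keys_mk, List.map_map, Function.comp_def, PySem.List.map_snd_enumerate]

theorem pvContains_idex (ws : List String) (x : String) :
    (PySem.Dict.mk (pvIdex ws)).contains x = decide (x ∈ ws) := by
  rw [PySem.Dict.contains_eq_decide_mem_keys, pvKeys_idex]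

theorem pvSize_idex (ws : List String) : (PySem.Dict.mk (pvIdex ws)).size = ws.length := by
  simp [pvIdex, PySem.Dict.size, PySem.List.length_enumerate]

theorem pvIdex_append (ws : List String) (w : String) :
    pvIdex (ws ++ [w]) = pvIdex ws ++ [(w, (ws.length : Int))] := by
  simp [pvIdex, PySem.List.enumerate_append, PySem.List.enumerate_cons, PySem.List.enumerate_nil]

theorem pvSet_add_eq (s : List String) (x : String) :
    PySem.Set.add s x = if x ∈ s then s else s ++ [x] := by
  simp [PySem.Set.add, PySem.Set.contains]

theorem pvNodup_append_singleton (s : List String) (x : String) (h : s.Nodup) (hx : x ∉ s) :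
    (s ++ [x]).Nodup := by
  simp only [List.nodup_append, List.nodup_singleton, true_and]
  refine ⟨h, ?_⟩
  intro a ha b hb
  have hbx : b = x := by simpa using hb
  subst hbx
  intro hab
  exact hx (hab ▸ ha)

theorem pvNodup_add (s : List String) (x : String) (h : s.Nodup) : (PySem.Set.add s x).Nodup := by
  rw [pvSet_add_eq]; split_ifs with hx
  · exact h
  · exact pvNodup_append_singleton s x h hx

theorem pvNodup_update (xs s : List String) (h : s.Nodup) : (PySem.Set.update s xs).Nodup := by
  induction xs generalizing s with
  | nil => exact h
  | cons a as ih =>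
    have : PySem.Set.update s (a :: as) = PySem.Set.update (PySem.Set.add s a) as := by
      simp [PySem.Set.update]
    rw [this]; exact ih _ (pvNodup_add s a h)

theorem pvWloop (xs : List String) (ws : List String) (hw : ws.Nodup) :
    xs.foldl (fun d w => d.setdefault w (d.size : Int)) (PySem.Dict.mk (pvIdex ws))
      = PySem.Dict.mk (pvIdex (PySem.Set.update ws xs)) := by
  induction xs generalizing ws with
  | nil => simp [PySem.Set.update]
  | cons x xs ih =>
    have hstep : (PySem.Dict.mk (pvIdex ws)).setdefault x ((PySem.Dict.mk (pvIdex ws)).size : Int)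
        = PySem.Dict.mk (pvIdex (PySem.Set.add ws x)) := by
      by_cases hx : x ∈ ws
      · rw [PySem.Dict.setdefault_of_contains _ _ (by rw [pvContains_idex]; simp [hx]),
          pvSet_add_eq, if_pos hx]
      · rw [PySem.Dict.setdefault_of_not_contains _ _ (by rw [pvContains_idex]; simp [hx])]
        apply PySem.Dict.ext
        rw [PySem.Dict.items_insert_of_not_contains _ _ (by rw [pvContains_idex]; simp [hx])]
        rw [pvSet_add_eq, if_neg hx, pvIdex_append, pvSize_idex]
    have hupd : PySem.Set.update ws (x :: xs) = PySem.Set.update (PySem.Set.add ws x) xs := by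
      simp [PySem.Set.update]
    rw [List.foldl_cons, hstep, ih _ (pvNodup_add ws x hw), hupd]

-- one outer-loop step on the tag dictionaries: setdefault, then the ix_to_tag insert
theorem pvTstep (ts : List String) (ht : ts.Nodup) (t : String) :
    ((PySem.Dict.mk (pvIdex ts)).setdefault t ((PySem.Dict.mk (pvIdex ts)).size : Int)
       = PySem.Dict.mk (pvIdex (PySem.Set.add ts t)))
    ∧ ((PySem.Dict.mk (PySem.List.enumerate ts)).insert
         ((PySem.Dict.mk (pvIdex (PySem.Set.add ts t))).getD t 0) t
       = PySem.Dict.mk (PySem.List.enumerate (PySem.Set.add ts t))) := by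
  by_cases hx : t ∈ ts
  · have hadd : PySem.Set.add ts t = ts := by rw [pvSet_add_eq, if_pos hx]
    obtain ⟨k, hk, hkt⟩ := List.mem_iff_getElem.mp hx
    have hmem : (t, (k : Int)) ∈ pvIdex ts := by
      simp only [pvIdex, List.mem_map]
      exact ⟨((0 : Int) + (k : Int), ts[k]), by
        rw [PySem.List.mem_enumerate_iff]; exact ⟨k, hk, rfl⟩, by simp [hkt]⟩
    have hgetD : (PySem.Dict.mk (pvIdex ts)).getD t 0 = (k : Int) :=
      PySem.Dict.getD_of_mem_items _ hmem (by show (PySem.Dict.mk (pvIdex ts)).keys.Nodup; rw [pvKeys_idex]; exact ht) 0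
    have hconI : (PySem.Dict.mk (PySem.List.enumerate ts)).contains ((k : Int)) = true := by
      rw [PySem.Dict.contains_eq_decide_mem_keys]
      simp only [PySem.Dict.keys_mk, decide_eq_true_eq, List.mem_map]
      exact ⟨((0 : Int) + (k : Int), ts[k]), by
        rw [PySem.List.mem_enumerate_iff]; exact ⟨k, hk, rfl⟩, by simp⟩
    have hins : (PySem.Dict.mk (PySem.List.enumerate ts)).insert ((k : Int)) t
        = PySem.Dict.mk (PySem.List.enumerate ts) := by
      apply PySem.Dict.ext
      rw [PySem.Dict.items_insert_of_contains _ _ hconI]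
      show List.map _ (PySem.List.enumerate ts) = PySem.List.enumerate ts
      conv_rhs => rw [← List.map_id (PySem.List.enumerate ts)]
      apply List.map_congr_left
      intro p hp
      rw [PySem.List.mem_enumerate_iff] at hp
      obtain ⟨j, hj, hpj⟩ := hp
      subst hpj
      by_cases hjk : j = k
      · subst hjk
        simp [hkt]
      · have hc : (((0 : Int) + (j : Int)) == (k : Int)) = false := by
          simp only [beq_eq_false_iff_ne, ne_eq]
          omega
        simp only [hc, Bool.false_eq_true, if_false, id_eq]
    constructor
    · rw [PySem.Dict.setdefault_of_contains _ _ (by rw [pvContains_idex]; simp [hx]), hadd]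
    · rw [hadd, hgetD, hins]
  · have hadd : PySem.Set.add ts t = ts ++ [t] := by rw [pvSet_add_eq, if_neg hx]
    have h1 : (PySem.Dict.mk (pvIdex ts)).setdefault t ((PySem.Dict.mk (pvIdex ts)).size : Int)
        = PySem.Dict.mk (pvIdex (ts ++ [t])) := by
      rw [PySem.Dict.setdefault_of_not_contains _ _ (by rw [pvContains_idex]; simp [hx]), pvSize_idex]
      apply PySem.Dict.ext
      rw [PySem.Dict.items_insert_of_not_contains _ _ (by rw [pvContains_idex]; simp [hx]), pvIdex_append]
    have hndap : (ts ++ [t]).Nodup := pvNodup_append_singleton ts t ht hx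
    have hgetD : (PySem.Dict.mk (pvIdex (ts ++ [t]))).getD t 0 = (ts.length : Int) := by
      apply PySem.Dict.getD_of_mem_items
      · rw [pvIdex_append]; simp
      · show (PySem.Dict.mk (pvIdex (ts ++ [t]))).keys.Nodup
        rw [pvKeys_idex]; exact hndap
    have hconI : (PySem.Dict.mk (PySem.List.enumerate ts)).contains ((ts.length : Int)) = false := by
      rw [PySem.Dict.contains_eq_decide_mem_keys]
      simp only [PySem.Dict.keys_mk, decide_eq_false_iff_not, List.mem_map]
      rintro ⟨p, hp, hp1⟩
      rw [PySem.List.mem_enumerate_iff] at hp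
      obtain ⟨j, hj, rfl⟩ := hp
      simp only at hp1
      omega
    have hinsI : (PySem.Dict.mk (PySem.List.enumerate ts)).insert ((ts.length : Int)) t
        = PySem.Dict.mk (PySem.List.enumerate (ts ++ [t])) := by
      apply PySem.Dict.ext
      rw [PySem.Dict.items_insert_of_not_contains _ _ hconI]
      show PySem.List.enumerate ts ++ _ = _
      rw [PySem.List.enumerate_append]
      simp [PySem.List.enumerate_cons, PySem.List.enumerate_nil]
    exact ⟨hadd ▸ h1, by rw [hadd, hgetD, hinsI]⟩

theorem pvMain (l : List (String × String)) (ws ts : List String) (hw : ws.Nodup) (ht : ts.Nodup) :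
    l.foldl pvStepA (PySem.Dict.mk (pvIdex ws), PySem.Dict.mk (pvIdex ts), PySem.Dict.mk (PySem.List.enumerate ts))
      = (PySem.Dict.mk (pvIdex (PySem.Set.update ws (l.flatMap (fun p => PySem.Str.split₀ p.1)))),
         PySem.Dict.mk (pvIdex (PySem.Set.update ts (l.map (fun p => p.2)))),
         PySem.Dict.mk (PySem.List.enumerate (PySem.Set.update ts (l.map (fun p => p.2))))) := by
  induction l generalizing ws ts with
  | nil => simp [PySem.Set.update]
  | cons p l ih =>
    have hstep : pvStepA (PySem.Dict.mk (pvIdex ws), PySem.Dict.mk (pvIdex ts), PySem.Dict.mk (PySem.List.enumerate ts)) p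
        = (PySem.Dict.mk (pvIdex (PySem.Set.update ws (PySem.Str.split₀ p.1))),
           PySem.Dict.mk (pvIdex (PySem.Set.add ts p.2)),
           PySem.Dict.mk (PySem.List.enumerate (PySem.Set.add ts p.2))) := by
      simp only [pvStepA]
      rw [pvWloop _ ws hw, (pvTstep ts ht p.2).1, (pvTstep ts ht p.2).2]
    rw [List.foldl_cons, hstep, ih _ _ (pvNodup_update _ ws hw) (pvNodup_add ts p.2 ht)]
    have h1 : PySem.Set.update (PySem.Set.update ws (PySem.Str.split₀ p.1)) (l.flatMap (fun p => PySem.Str.split₀ p.1))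
        = PySem.Set.update ws ((p :: l).flatMap (fun p => PySem.Str.split₀ p.1)) := by
      simp [PySem.Set.update, List.flatMap_cons, List.foldl_append]
    have h2 : PySem.Set.update (PySem.Set.add ts p.2) (l.map (fun p => p.2))
        = PySem.Set.update ts ((p :: l).map (fun p => p.2)) := by
      simp [PySem.Set.update]
    rw [h1, h2]

-- ===== B-side lemmas: pvRank stream is the first-occurrence dedup of stream =====

-- the dict `first` built by B's reverse sweep
def pvFirst (stream : List String) : PySem.Dict String Int :=
  ((PySem.List.enumerate stream).reverse).foldl
    (fun d q => d.insert q.2 q.1) (PySem.Dict.empty : PySem.Dict String Int)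

-- a right fold of inserts answers lookups by the FIRST pair with the key
theorem pvFoldrGet (l : List (Int × String)) (d : PySem.Dict String Int) (x : String) :
    (l.foldr (fun q d => d.insert q.2 q.1) d).get? x
      = match l.find? (fun q => q.2 == x) with
        | some q => some q.1
        | none => d.get? x := by
  induction l with
  | nil => simp
  | cons q l ih =>
    rw [List.foldr_cons, List.find?_cons]
    by_cases hq : q.2 = x
    · simp [hq]
    · have : (q.2 == x) = false := by simpa using hq
      rw [PySem.Dict.get?_insert]
      simp only [this]
      rw [if_neg (fun h => hq h.symm), ih]

-- find? over enumerate points at the first occurrence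
theorem pvFindEnum (stream : List String) (x : String) (s : Int) (hx : x ∈ stream) :
    (PySem.List.enumerate stream s).find? (fun q => q.2 == x)
      = some (s + (List.idxOf x stream : Int), x) := by
  induction stream generalizing s with
  | nil => cases hx
  | cons a l ih =>
    rw [PySem.List.enumerate_cons, List.find?_cons]
    by_cases ha : a = x
    · subst ha
      simp
    · have hb : (a == x) = false := by simpa using ha
      have hxl : x ∈ l := by
        rcases List.mem_cons.mp hx with h | h
        · exact absurd h.symm ha
        · exact h
      simp only [hb]
      rw [ih (s + 1) hxl, List.idxOf_cons, hb]
      simp only [cond_false]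
      congr 1
      push_cast
      ring_nf

theorem pvFirst_getD (stream : List String) (x : String) (hx : x ∈ stream) :
    (pvFirst stream).getD x 0 = (List.idxOf x stream : Int) := by
  have hget : (pvFirst stream).get? x = some ((List.idxOf x stream : Int)) := by
    rw [pvFirst, List.foldl_reverse, pvFoldrGet, pvFindEnum stream x 0 hx]
    simp
  rw [PySem.Dict.getD_eq_get?_getD, hget]
  rfl

theorem pvFirst_keys (stream : List String) :
    (pvFirst stream).keys = PySem.Set.ofList stream.reverse := by
  have h := PySem.Dict.keys_foldl_insert_key (ν := Int) ((PySem.List.enumerate stream).reverse)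
    (fun q => q.2) (fun _ q => q.1) (PySem.Dict.empty : PySem.Dict String Int)
  simp only at h
  rw [pvFirst, h, PySem.Set.ofList_eq_foldl]
  have : List.map (fun (q : Int × String) => q.2) (PySem.List.enumerate stream).reverse
      = stream.reverse := by
    rw [List.map_reverse, PySem.List.map_snd_enumerate]
  rw [this]
  show PySem.Set.update ([] : List String) stream.reverse = _
  simp [PySem.Set.update]

-- the dedup list is strictly increasing in first-occurrence position
theorem pvIdxOf_pairwise (stream : List String) :
    (PySem.Set.ofList stream).Pairwise (fun a b => List.idxOf a stream < List.idxOf b stream) := by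
  induction stream using List.reverseRecOn with
  | nil => simp [PySem.Set.ofList_eq_foldl]
  | append_singleton s x ih =>
    have hof : PySem.Set.ofList (s ++ [x]) = PySem.Set.add (PySem.Set.ofList s) x := by
      rw [PySem.Set.ofList_eq_foldl, PySem.Set.ofList_eq_foldl, List.foldl_append]
      rfl
    have hsame : ∀ a ∈ PySem.Set.ofList s, List.idxOf a (s ++ [x]) = List.idxOf a s := by
      intro a ha
      exact List.idxOf_append_of_mem ((PySem.Set.mem_ofList s a).mp ha)
    rw [hof, pvSet_add_eq]
    split_ifs with hxs
    · refine ih.imp_of_mem ?_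
      intro a b ha hb h
      rw [hsame a ha, hsame b hb]
      exact h
    · have hxns : x ∉ s := fun h => hxs ((PySem.Set.mem_ofList s x).mpr h)
      rw [List.pairwise_append]
      refine ⟨ih.imp_of_mem (fun {a b} ha hb h => by rw [hsame a ha, hsame b hb]; exact h),
        List.pairwise_singleton _ _, ?_⟩
      intro a ha b hb
      have hbx : b = x := by simpa using hb
      subst hbx
      have has : a ∈ s := (PySem.Set.mem_ofList s a).mp ha
      rw [hsame a ha, List.idxOf_append, if_neg hxns]
      have h1 : List.idxOf a s < s.length := List.idxOf_lt_length_of_mem has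
      omega

theorem pvRank_eq (stream : List String) : pvRank stream = PySem.Set.ofList stream := by
  show PySem.List.sorted (pvFirst stream).keys (fun x => (pvFirst stream).getD x 0)
      = PySem.Set.ofList stream
  apply PySem.List.sorted_eq_of_perm_of_pairwise_lt
  · rw [pvFirst_keys]
    rw [List.perm_ext_iff_of_nodup (PySem.Set.nodup_ofList _) (PySem.Set.nodup_ofList _)]
    intro a
    rw [PySem.Set.mem_ofList, PySem.Set.mem_ofList, List.mem_reverse]
  · refine (pvIdxOf_pairwise stream).imp_of_mem ?_
    intro a b ha hb h
    have has := (PySem.Set.mem_ofList stream a).mp ha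
    have hbs := (PySem.Set.mem_ofList stream b).mp hb
    rw [pvFirst_getD stream a has, pvFirst_getD stream b hbs]
    exact_mod_cast h

-- ===== VERDICT (by name: the statement is the Claim_ definition above) =====
theorem load_vocab_tags_spec : Claim_equal_load_vocab_tags := by
  intro td _
  show load_vocab_tags td = load_vocab_tags_alt td
  have h0 : ((PySem.Dict.empty : PySem.Dict String Int), (PySem.Dict.empty : PySem.Dict String Int), (PySem.Dict.empty : PySem.Dict Int String))
      = ((PySem.Dict.mk (pvIdex []) : PySem.Dict String Int),
         (PySem.Dict.mk (pvIdex []) : PySem.Dict String Int),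
         (PySem.Dict.mk (PySem.List.enumerate ([] : List String)) : PySem.Dict Int String)) := rfl
  have hup : ∀ xs : List String, PySem.Set.update ([] : List String) xs = PySem.Set.ofList xs := by
    intro xs; simp [PySem.Set.update, PySem.Set.ofList_eq_foldl]
  rw [load_vocab_tags, h0, pvMain td [] [] List.nodup_nil List.nodup_nil]
  simp only [hup, load_vocab_tags_alt, pvRank_eq]
  rfl
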